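-- pv_equiv track=rewrite | github.com/Neelesh007hub/custom-s-mcp-server-architecture | file_query_mcp_secure.py | extract_file_names_from_message
-- ===== SOURCE A (Python) =====
-- def extract_file_names_from_message(message: str) -> list:
--     """Extract file names from message"""
--     file_extensions = ['.csv', '.json', '.xlsx', '.parquet']
--     words = message.split()
--     file_names = []
--
--     for word in words:
--         for ext in file_extensions:
--             if ext in word.lower():
--                 file_names.append(word)
--                 break
--
--     return file_names
-- ===== SOURCE B (Python) =====
-- def extract_file_names_from_message(message: str) -> list:
--     """Extract file names from message (single streaming pass, no split)."""
--     exts = ['.csv', '.json', '.xlsx', '.parquet']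
--     out = []
--     cur = []          # characters of the current whitespace-delimited token
--     found = False     # token read so far already contains an extension
--     for ch in message:
--         if ch.isspace():
--             if found:
--                 out.append(''.join(cur))
--             cur = []
--             found = False
--         else:
--             cur.append(ch)
--             if not found:
--                 for ext in exts:
--                     if ''.join(cur[-len(ext):]).lower() == ext:
--                         found = True
--                         break
--     if found:
--         out.append(''.join(cur))
--     return out
-- ===== Notes on version B (the rewrite author's own statement) =====
-- stated objective: alternative
-- what changed: Replaces split-into-words plus a nested for-each-extension substring scan with a single streaming pass over the characters that builds the current token and detects an extension on the fly by an O(1) lowered-suffix check per character.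
import Mathlib
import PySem

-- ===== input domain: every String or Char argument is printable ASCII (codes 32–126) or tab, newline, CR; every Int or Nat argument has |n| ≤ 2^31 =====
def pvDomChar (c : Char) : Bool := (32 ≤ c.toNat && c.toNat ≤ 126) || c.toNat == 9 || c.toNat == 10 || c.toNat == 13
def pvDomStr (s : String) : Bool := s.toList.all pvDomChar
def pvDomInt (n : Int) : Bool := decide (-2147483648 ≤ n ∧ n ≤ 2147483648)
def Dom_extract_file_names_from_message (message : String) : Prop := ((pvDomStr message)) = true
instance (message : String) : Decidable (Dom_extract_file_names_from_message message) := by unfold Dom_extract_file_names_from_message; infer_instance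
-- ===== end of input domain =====

-- B replaces A's split-then-nested-scan with a single streaming pass over the characters
-- that checks lowered token suffixes on the fly (objective: alternative, same cost).

-- ===== PORT A =====
-- for ext in file_extensions: if ext in word.lower(): (append; break)  — first-match loop as a Bool
def aHasExt : List String → String → Bool
  | [], _ => false
  | ext :: rest, word =>
      if PySem.Str.isIn ext (PySem.Str.lower word) then true else aHasExt rest word

def extract_file_names_from_message (message : String) : List String :=
  let file_extensions : List String := [".csv", ".json", ".xlsx", ".parquet"]
  let words := PySem.Str.split₀ message
  let file_names : List String :=
    words.foldl (fun acc word =>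
      if aHasExt file_extensions word then acc ++ [word] else acc) []
  file_names

-- ===== PORT B =====
def bExts : List (List Char) := [".csv".toList, ".json".toList, ".xlsx".toList, ".parquet".toList]

-- one step of the streaming scan; state = (cur, found, out)
def bStep (st : List Char × Bool × List String) (ch : Char) : List Char × Bool × List String :=
  if PySem.Chars.isspace ch then
    ([], false, if st.2.1 then st.2.2 ++ [String.ofList st.1] else st.2.2)
  else
    let cur := st.1 ++ [ch]
    let found := if st.2.1 then true
      else bExts.any (fun ext =>
        PySem.Chars.lower (PySem.List.slice cur (some (-(ext.length : Int))) none) == ext)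
    (cur, found, st.2.2)

def extract_file_names_from_message_alt (message : String) : List String :=
  let st := message.toList.foldl bStep ([], false, [])
  if st.2.1 then st.2.2 ++ [String.ofList st.1] else st.2.2

-- ===== PRECONDITION & SPEC =====
def Spec_extract_file_names_from_message (message : String) (out : List String) : Prop := out = extract_file_names_from_message_alt message
instance (message : String) (out : List String) : Decidable (Spec_extract_file_names_from_message message out) := by unfold Spec_extract_file_names_from_message; infer_instance

-- ===== CLAIM (what is proved, stated in full; the proofs are below) =====
def Claim_equal_extract_file_names_from_message : Prop := ∀ (message : String), Dom_extract_file_names_from_message message → Spec_extract_file_names_from_message message (extract_file_names_from_message message)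


-- ===== LEMMAS AND PROOFS =====

-- "token cs contains an extension" — the semantic invariant both loops compute
def hasExtL (cs : List Char) : Bool :=
  bExts.any (fun e => PySem.Chars.isIn e (PySem.Chars.lower cs))

theorem hasExtL_nil : hasExtL [] = false := by decide

-- A's first-match loop over the literal extension list computes hasExtL
theorem aHasExt_eq (w : String) :
    aHasExt [".csv", ".json", ".xlsx", ".parquet"] w = hasExtL w.toList := by
  simp only [aHasExt, hasExtL, bExts, List.any_cons, List.any_nil,
    PySem.Str.isIn, PySem.Str.lower, String.toList_ofList, Bool.or_false]
  cases h1 : PySem.Chars.isIn ".csv".toList (PySem.Chars.lower w.toList) <;>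
  cases h2 : PySem.Chars.isIn ".json".toList (PySem.Chars.lower w.toList) <;>
  cases h3 : PySem.Chars.isIn ".xlsx".toList (PySem.Chars.lower w.toList) <;>
  cases h4 : PySem.Chars.isIn ".parquet".toList (PySem.Chars.lower w.toList) <;> simp

-- infix of xs ++ [c] is infix of xs or a suffix of the whole
theorem infix_append_singleton {e xs : List Char} {c : Char} :
    e <:+: (xs ++ [c]) ↔ e <:+: xs ∨ e <:+ (xs ++ [c]) := by
  constructor
  · rintro ⟨s, t, h⟩
    rcases List.eq_nil_or_concat t with rfl | ⟨t', d, rfl⟩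
    · right; exact ⟨s, by simpa using h⟩
    · left
      have h' : (s ++ e ++ t') ++ [d] = xs ++ [c] := by simpa using h
      have := List.append_inj' h' rfl
      exact ⟨s, t', by simpa using this.1⟩
  · rintro (h | h)
    · exact h.trans ⟨[], [c], by simp⟩
    · exact h.isInfix

-- B's per-extension suffix test, translated to "e is a suffix of the lowered token"
theorem per_ext_suffix (e cs : List Char) (he : 0 < e.length) :
    ((PySem.Chars.lower (PySem.List.slice cs (some (-(e.length : Int))) none) == e) = true)
      ↔ e <:+ PySem.Chars.lower cs := by
  have hcomm : PySem.Chars.lower (List.drop (cs.length - e.length) cs)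
      = List.drop (cs.length - e.length) (PySem.Chars.lower cs) := by
    simp [PySem.Chars.lower, List.map_drop]
  have hlen : (PySem.Chars.lower cs).length = cs.length := by
    simp [PySem.Chars.lower]
  rw [PySem.List.slice_from_neg_natCast cs e.length he, List.suffix_iff_eq_drop, beq_iff_eq,
    hcomm, hlen]
  exact eq_comm

-- B's per-character test equals the growth of hasExtL
theorem hasExtL_append (cs : List Char) (c : Char) :
    hasExtL (cs ++ [c]) =
      (hasExtL cs || bExts.any (fun ext =>
        PySem.Chars.lower (PySem.List.slice (cs ++ [c]) (some (-(ext.length : Int))) none) == ext)) := by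
  have hne : ∀ e ∈ bExts, 0 < e.length := by decide
  have : ∀ (a b : Bool), (a = true ↔ b = true) → a = b := by decide
  apply this
  simp only [hasExtL, Bool.or_eq_true, List.any_eq_true]
  constructor
  · rintro ⟨e, hm, he⟩
    have hlow : PySem.Chars.lower (cs ++ [c]) =
        PySem.Chars.lower cs ++ [PySem.Chars.lowerChar c] := by
      simp [PySem.Chars.lower]
    rw [hlow, PySem.Chars.isIn_iff_infix, infix_append_singleton] at he
    rcases he with he | he
    · exact Or.inl ⟨e, hm, (PySem.Chars.isIn_iff_infix _ _).mpr he⟩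
    · refine Or.inr ⟨e, hm, (per_ext_suffix e (cs ++ [c]) (hne e hm)).mpr ?_⟩
      rw [hlow]; exact he
  · have hlow : PySem.Chars.lower (cs ++ [c]) =
        PySem.Chars.lower cs ++ [PySem.Chars.lowerChar c] := by
      simp [PySem.Chars.lower]
    rintro (⟨e, hm, he⟩ | ⟨e, hm, he⟩)
    · refine ⟨e, hm, ?_⟩
      rw [PySem.Chars.isIn_iff_infix, hlow, infix_append_singleton]
      exact Or.inl ((PySem.Chars.isIn_iff_infix _ _).mp he)
    · refine ⟨e, hm, ?_⟩
      rw [PySem.Chars.isIn_iff_infix, hlow, infix_append_singleton]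
      exact Or.inr (hlow ▸ (per_ext_suffix e (cs ++ [c]) (hne e hm)).mp he)

-- split₀.go accumulates: the acc prefixes the answer
theorem split₀_go_acc (cs : List Char) (rcur : List Char) (acc : List (List Char)) :
    PySem.Chars.split₀.go cs rcur acc = acc.reverse ++ PySem.Chars.split₀.go cs rcur [] := by
  induction cs generalizing rcur acc with
  | nil =>
      rw [PySem.Chars.split₀.go.eq_def, PySem.Chars.split₀.go.eq_def]
      by_cases h : rcur.isEmpty <;> simp [h]
  | cons c rest ih =>
      rw [PySem.Chars.split₀.go.eq_def]
      conv_rhs => rw [PySem.Chars.split₀.go.eq_def]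
      by_cases hs : PySem.Chars.isspace c <;> by_cases h : rcur.isEmpty <;>
        simp only [hs, h, if_true, if_false, Bool.false_eq_true]
      · exact ih [] acc
      · rw [ih [] (rcur.reverse :: acc), ih [] [rcur.reverse]]
        simp
      · exact ih _ _
      · exact ih _ _

-- the main streaming invariant
theorem main_inv (cs : List Char) (cur : List Char) (acc : List String) :
    (let st := cs.foldl bStep (cur, hasExtL cur, acc)
     if st.2.1 then st.2.2 ++ [String.ofList st.1] else st.2.2)
    = acc ++ ((PySem.Chars.split₀.go cs cur.reverse []).filter hasExtL).map String.ofList := by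
  induction cs generalizing cur acc with
  | nil =>
      rw [PySem.Chars.split₀.go.eq_def]
      rcases List.eq_nil_or_concat cur with rfl | ⟨cur', d, rfl⟩
      · simp [hasExtL_nil]
      · have h : ((cur' ++ [d]).reverse).isEmpty = false := by simp
        simp only [List.foldl_nil, List.reverse_reverse]
        by_cases hx : hasExtL (cur' ++ [d]) <;> simp [hx]
  | cons c rest ih =>
      rw [PySem.Chars.split₀.go.eq_def]
      by_cases hs : PySem.Chars.isspace c
      · have hrev : cur.reverse.isEmpty = cur.isEmpty := by
          cases cur <;> simp
        rcases List.eq_nil_or_concat cur with rfl | ⟨cur', d, rfl⟩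
        · simp only [List.foldl_cons, bStep, hs, if_true, hasExtL_nil, Bool.false_eq_true,
            if_false, List.reverse_nil, List.isEmpty_nil]
          have := ih [] acc
          simpa [hasExtL_nil] using this
        · have h : ((cur' ++ [d]).reverse).isEmpty = false := by simp
          simp only [List.foldl_cons, bStep, hs, if_true, h, Bool.false_eq_true, if_false,
            List.reverse_reverse, List.concat_eq_append]
          rw [split₀_go_acc rest [] [cur' ++ [d]]]
          have := ih ([]) (if hasExtL (cur' ++ [d]) then acc ++ [String.ofList (cur' ++ [d])] else acc)
          rw [hasExtL_nil] at this
          simp only [List.reverse_nil] at this ⊢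
          rw [this]
          by_cases hx : hasExtL (cur' ++ [d]) <;> simp [hx]
      · simp only [List.foldl_cons, bStep, hs, Bool.false_eq_true, if_false]
        have hstep : (if hasExtL cur then true
            else bExts.any (fun ext =>
              PySem.Chars.lower (PySem.List.slice (cur ++ [c]) (some (-(ext.length : Int))) none) == ext))
            = hasExtL (cur ++ [c]) := by
          rw [hasExtL_append]
          by_cases hx : hasExtL cur <;> simp [hx]
        rw [hstep]
        have := ih (cur ++ [c]) acc
        simpa using this

-- ===== VERDICT (by name: the statement is the Claim_ definition above) =====
theorem extract_file_names_from_message_spec : Claim_equal_extract_file_names_from_message := by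
  intro message _
  unfold Spec_extract_file_names_from_message
  unfold extract_file_names_from_message extract_file_names_from_message_alt
  have hB := main_inv message.toList [] []
  rw [hasExtL_nil] at hB
  simp only [List.reverse_nil, List.nil_append] at hB
  rw [hB]
  have hA := PySem.List.foldl_append_if
    (fun w => aHasExt [".csv", ".json", ".xlsx", ".parquet"] w) (id : String → String)
    (PySem.Str.split₀ message) []
  simp only [id_eq, List.nil_append] at hA
  dsimp only
  rw [hA]
  have hsplit : PySem.Chars.split₀.go message.toList [] [] =
      (PySem.Str.split₀ message).map String.toList := by
    rw [PySem.Str.split₀_map_toList]; rfl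
  rw [hsplit, List.filter_map, List.map_map]
  rw [List.filter_congr (fun w _ => aHasExt_eq w)]
  congr 1
  funext w
  simp [Function.comp]
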